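-- pv_equiv track=rewrite | github.com/stephen-huan/lectures | tjhsst/cv/k-means-kd-tree/code/decision_tree.py | render_dt
-- ===== SOURCE A (Python) =====
-- N = 5
--
-- def render_dt(dt: tuple) -> str:
--     """ Returns a Python function as a string that computes the median. """
--     I = " "*4
--     s = ["def median(l: list) -> float:",
--          f'{I}""" Computes the median of l, if len(l) == {N}. """']
--     stk = [(0, 1)]
--     while len(stk) > 0:            # render decision tree with dfs
--         n, d = stk.pop()
--         if n % 2 == 1:             # "odd" parity node, else clause
--             s.append(f"{I*(d - 1)}else:")
--         if len(dt[1][n]) == 1:     # leaf node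
--             s.append(f"{I*d}return l[{dt[1][n][0]}]")
--         else:                      # not a leaf node
--             i, j = dt[1][n]
--             s.append(f"{I*d}if l[{i}] < l[{j}]:")
--             for child in dt[0][n]: # expand on children
--                 stk.append((child, d + 1))
--     return "\n".join(s)
-- ===== SOURCE B (Python) =====
-- N = 5
--
-- def render_dt(dt: tuple) -> str:
--     """ Returns a Python function as a string that computes the median. """
--     I = " "*4
--     out = ["def median(l: list) -> float:",
--            f'{I}""" Computes the median of l, if len(l) == {N}. """']
--     def emit(n, d):               # recursive DFS instead of an explicit stack
--         if n % 2 == 1:            # "odd" parity node, else clause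
--             out.append(f"{I*(d - 1)}else:")
--         row = dt[1][n]
--         if len(row) == 1:         # leaf node
--             out.append(f"{I*d}return l[{row[0]}]")
--         else:                     # not a leaf node
--             i, j = row
--             out.append(f"{I*d}if l[{i}] < l[{j}]:")
--             for child in reversed(dt[0][n]):  # LIFO order of A's stack
--                 emit(child, d + 1)
--     emit(0, 1)
--     return "\n".join(out)
-- ===== Notes on version B (the rewrite author's own statement) =====
-- stated objective: simpler
-- what changed: Replaces the explicit-stack while-loop DFS by a recursive helper that recurses over each node's children in reversed order (matching the stack's LIFO pop order), appending lines as it goes.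
import Mathlib
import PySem

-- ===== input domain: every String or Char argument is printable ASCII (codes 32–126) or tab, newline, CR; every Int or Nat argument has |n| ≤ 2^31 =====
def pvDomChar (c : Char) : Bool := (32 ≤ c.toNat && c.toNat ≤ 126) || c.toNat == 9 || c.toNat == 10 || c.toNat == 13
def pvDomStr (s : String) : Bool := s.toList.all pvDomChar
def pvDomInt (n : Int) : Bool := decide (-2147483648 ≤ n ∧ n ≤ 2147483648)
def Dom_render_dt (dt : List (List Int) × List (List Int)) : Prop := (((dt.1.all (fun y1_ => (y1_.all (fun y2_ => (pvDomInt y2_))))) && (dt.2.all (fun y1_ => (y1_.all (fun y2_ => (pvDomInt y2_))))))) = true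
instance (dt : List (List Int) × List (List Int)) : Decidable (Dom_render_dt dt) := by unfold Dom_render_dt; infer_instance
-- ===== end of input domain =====

-- B replaces A's explicit-stack while-loop DFS by a recursive emitter over reversed children (same output; objective: simpler).

-- Shared line-formatting helpers (the f-strings both Pythons build)
def pvIndent (k : Nat) : String := String.ofList (List.replicate (4*k) ' ')
def pvHeader : List String :=
  ["def median(l: list) -> float:",
   pvIndent 1 ++ "\"\"\" Computes the median of l, if len(l) == 5. \"\"\""]
def pvElseLine (d : Nat) : String := pvIndent (d-1) ++ "else:"
def pvRetLine (d : Nat) (v : Int) : String := pvIndent d ++ "return l[" ++ PySem.Int.toStr v ++ "]"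
def pvIfLine (d : Nat) (i j : Int) : String :=
  pvIndent d ++ "if l[" ++ PySem.Int.toStr i ++ "] < l[" ++ PySem.Int.toStr j ++ "]:"

-- ===== PORT A =====
-- A's while-loop over the stack (top of stack = head of list); the fuel argument only
-- makes the loop total, Pre_ guarantees the fuel passed in render_dt is never exhausted
def renderLoop (dt : List (List Int) × List (List Int)) :
    Nat → List (Int × Nat) → List String → List String
  | 0, _, s => s
  | _+1, [], s => s
  | f+1, (n, d) :: rest, s =>
    let s1 := if PySem.Int.mod n 2 = 1 then s ++ [pvElseLine d] else s
    match PySem.List.pyGet? dt.2 n with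
    | none => s1          -- Python raises IndexError here; excluded by Pre_
    | some row =>
      if row.length = 1 then
        renderLoop dt f rest (s1 ++ [pvRetLine d (row.getD 0 0)])
      else if row.length = 2 then
        let s2 := s1 ++ [pvIfLine d (row.getD 0 0) (row.getD 1 0)]
        match PySem.List.pyGet? dt.1 n with
        | none => s2      -- Python raises IndexError here; excluded by Pre_
        | some ch => renderLoop dt f (ch.reverse.map (fun c => (c, d+1)) ++ rest) s2
      else s1             -- Python raises ValueError (unpacking); excluded by Pre_

def render_dt (dt : List (List Int) × List (List Int)) : String :=
  String.intercalate "\n"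
    (renderLoop dt (((dt.1.map List.length).sum + 1) ^ dt.2.length) [(0, 1)] pvHeader)

-- ===== PORT B =====
-- B's recursive emitter over reversed children (fuel only makes it total; under Pre_
-- child indices strictly increase, so recursion depth is below dt.2.length)
def emitAlt (dt : List (List Int) × List (List Int)) : Nat → Int → Nat → List String
  | 0, _, _ => []
  | f+1, n, d =>
    (if PySem.Int.mod n 2 = 1 then [pvElseLine d] else []) ++
    (match PySem.List.pyGet? dt.2 n with
     | none => []
     | some row =>
       if row.length = 1 then [pvRetLine d (row.getD 0 0)]
       else if row.length = 2 then
         pvIfLine d (row.getD 0 0) (row.getD 1 0) ::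
           (((PySem.List.pyGet? dt.1 n).getD []).reverse.flatMap (fun c => emitAlt dt f c (d+1)))
       else [])

def render_dt_alt (dt : List (List Int) × List (List Int)) : String :=
  String.intercalate "\n" (pvHeader ++ emitAlt dt dt.2.length 0 1)

-- ===== PRECONDITION & SPEC =====
-- Pre_ admits trees whose root is a leaf (the only node A then visits) or that are globally
-- well-formed with strictly increasing child indices; it excludes inputs on which A raises
-- (IndexError/ValueError) or loops forever, and also some trees with backward-pointing or
-- negative (wrapping) child indices on which A still returns a string — there B returns the
-- same string (Pre_ is narrower than strictly needed; see the cites in the claim).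
def Pre_render_dt (dt : List (List Int) × List (List Int)) : Prop :=
  (dt.2 ≠ [] ∧ dt.2[0]!.length = 1) ∨
  (dt.1.length = dt.2.length ∧ dt.2 ≠ [] ∧
   ∀ k, k < dt.2.length →
     (dt.2[k]!.length = 1 ∨
      (dt.2[k]!.length = 2 ∧ ∀ c ∈ dt.1[k]!, (k : Int) < c ∧ c < (dt.2.length : Int))))
instance (dt : List (List Int) × List (List Int)) : Decidable (Pre_render_dt dt) := by
  unfold Pre_render_dt; infer_instance

def pvWitness_render_dt : (List (List Int) × List (List Int)) :=
  ([[1, 2], [], []], [[0, 1], [2], [3]])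

def Spec_render_dt (dt : List (List Int) × List (List Int)) (out : String) : Prop :=
  out = render_dt_alt dt
instance (dt : List (List Int) × List (List Int)) (out : String) :
    Decidable (Spec_render_dt dt out) := by unfold Spec_render_dt; infer_instance

-- ===== CLAIM (what is proved, stated in full; the proofs are below) =====
def Claim_equal_render_dt : Prop :=
  ∀ (dt : List (List Int) × List (List Int)),
    Dom_render_dt dt → Pre_render_dt dt → Spec_render_dt dt (render_dt dt)

-- ===== LEMMAS AND PROOFS =====

-- weight of a node / of a whole stack, the termination measure of A's loop
def pvW (dt : List (List Int) × List (List Int)) (n : Int) : Nat :=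
  ((dt.1.map List.length).sum + 1) ^ (dt.2.length - n.toNat)
def pvSW (dt : List (List Int) × List (List Int)) (stk : List (Int × Nat)) : Nat :=
  (stk.map (fun p => pvW dt p.1)).sum

lemma pv_flatMap_congr {α β : Type} {l : List α} {f g : α → List β}
    (h : ∀ a ∈ l, f a = g a) : l.flatMap f = l.flatMap g := by
  induction l with
  | nil => rfl
  | cons a l ih => simp_all

-- table accesses succeed at a good node
lemma pv_get2 (dt : List (List Int) × List (List Int)) (n : Int)
    (h0 : 0 ≤ n) (h1 : n < (dt.2.length : Int)) :
    PySem.List.pyGet? dt.2 n = some dt.2[n.toNat]! := by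
  rw [PySem.List.pyGet?_eq_some_getElem (xs := dt.2) h0 h1, getElem!_pos]

lemma pv_get1 (dt : List (List Int) × List (List Int)) (hlen : dt.1.length = dt.2.length)
    (n : Int) (h0 : 0 ≤ n) (h1 : n < (dt.2.length : Int)) :
    PySem.List.pyGet? dt.1 n = some dt.1[n.toNat]! := by
  rw [PySem.List.pyGet?_eq_some_getElem (xs := dt.1) h0 (by rw [hlen]; exact h1), getElem!_pos]

-- B's emitter does not depend on the fuel, as soon as the fuel is at least length − n
def pvWF (dt : List (List Int) × List (List Int)) : Prop :=
  dt.1.length = dt.2.length ∧ dt.2 ≠ [] ∧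
  ∀ k, k < dt.2.length →
    (dt.2[k]!.length = 1 ∨
     (dt.2[k]!.length = 2 ∧ ∀ c ∈ dt.1[k]!, (k : Int) < c ∧ c < (dt.2.length : Int)))

lemma pv_renderLoop_nil (dt : List (List Int) × List (List Int)) (f : Nat) (s : List String) :
    renderLoop dt f [] s = s := by
  cases f <;> simp [renderLoop]

lemma emitAlt_stable (dt : List (List Int) × List (List Int))
    (hpre : pvWF dt) :
    ∀ f1 f2 (n : Int) (d : Nat), 0 ≤ n → n < (dt.2.length : Int) →
      dt.2.length - n.toNat ≤ f1 → dt.2.length - n.toNat ≤ f2 →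
      emitAlt dt f1 n d = emitAlt dt f2 n d := by
  intro f1
  induction f1 with
  | zero => intro f2 n d h0 h1 hf1 hf2; exfalso; omega
  | succ f1 ih =>
    intro f2 n d h0 h1 hf1 hf2
    obtain ⟨f2', rfl⟩ : ∃ f2', f2 = f2' + 1 := ⟨f2 - 1, by omega⟩
    have hrow := pv_get2 dt n h0 h1
    have hch' := pv_get1 dt hpre.1 n h0 h1
    have hknat : n.toNat < dt.2.length := by omega
    simp only [emitAlt, hrow, hch', Option.getD_some]
    congr 1
    rcases hpre.2.2 n.toNat hknat with hleaf | ⟨hlen2, hch⟩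
    · rw [if_pos hleaf, if_pos hleaf]
    · have hne1 : ¬ dt.2[n.toNat]!.length = 1 := by omega
      rw [if_neg hne1, if_neg hne1, if_pos hlen2, if_pos hlen2]
      congr 1
      apply pv_flatMap_congr
      intro c hc
      have hc' := hch c (List.mem_reverse.mp hc)
      exact ih f2' c (d+1) (by omega) hc'.2 (by omega) (by omega)

-- the measure inequality behind A's fuel: children of n weigh strictly less than n
lemma pv_children_weight (dt : List (List Int) × List (List Int))
    (n : Int) (h0 : 0 ≤ n) (h1 : n < (dt.2.length : Int))
    (hlen : dt.1.length = dt.2.length)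
    (hch : ∀ c ∈ dt.1[n.toNat]!, (n.toNat : Int) < c ∧ c < (dt.2.length : Int))
    (d : Nat) :
    pvSW dt (dt.1[n.toNat]!.reverse.map (fun c => (c, d))) + 1 ≤ pvW dt n := by
  set C := (dt.1.map List.length).sum with hC
  set L := dt.2.length with hL
  have hX : 1 ≤ (C + 1) ^ (L - n.toNat - 1) := Nat.one_le_pow _ _ (by omega)
  have hlenC : dt.1[n.toNat]!.length ≤ C := by
    have hmem : dt.1[n.toNat]! ∈ dt.1 := by
      rw [getElem!_pos dt.1 n.toNat (by omega)]; exact List.getElem_mem _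
    exact List.single_le_sum (by simp) _ (List.mem_map_of_mem (f := List.length) hmem)
  have hsum : pvSW dt (dt.1[n.toNat]!.reverse.map (fun c => (c, d))) ≤
      dt.1[n.toNat]!.length * (C + 1) ^ (L - n.toNat - 1) := by
    unfold pvSW
    have := List.sum_le_card_nsmul ((dt.1[n.toNat]!.reverse.map (fun c => (c, d))).map
        (fun p => pvW dt p.1)) ((C + 1) ^ (L - n.toNat - 1)) ?_
    · simpa using this
    · intro x hx
      simp only [List.map_map, List.mem_map, List.mem_reverse, Function.comp] at hx
      obtain ⟨c, hc, rfl⟩ := hx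
      have hc' := hch c hc
      simp only [pvW, ← hC, ← hL]
      exact Nat.pow_le_pow_right (by omega) (by omega)
  have hW : pvW dt n = (C + 1) ^ (L - n.toNat - 1) * (C + 1) := by
    unfold pvW
    rw [← hC, ← hL, ← pow_succ]
    congr 1
    omega
  nlinarith [hsum, hX, hlenC, hW]

-- A's loop emits, per stack entry in pop order, exactly what B's emitter emits
lemma renderLoop_eq (dt : List (List Int) × List (List Int))
    (hpre : pvWF dt) :
    ∀ (f : Nat) (stk : List (Int × Nat)) (s : List String),
      (∀ p ∈ stk, 0 ≤ p.1 ∧ p.1 < (dt.2.length : Int)) →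
      pvSW dt stk ≤ f →
      renderLoop dt f stk s =
        s ++ stk.flatMap (fun p => emitAlt dt (dt.2.length - p.1.toNat) p.1 p.2) := by
  intro f
  induction f with
  | zero =>
    intro stk s hg hf
    match stk with
    | [] => simp [renderLoop]
    | (n, d) :: rest =>
      exfalso
      have : 1 ≤ pvW dt n := Nat.one_le_pow _ _ (by omega)
      simp only [pvSW, List.map_cons, List.sum_cons] at hf
      omega
  | succ f ih =>
    intro stk s hg hf
    match stk with
    | [] => simp [renderLoop]
    | (n, d) :: rest =>
      obtain ⟨h0, h1⟩ := hg (n, d) List.mem_cons_self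
      have hknat : n.toNat < dt.2.length := by omega
      have hrow := pv_get2 dt n h0 h1
      have hWpos : 1 ≤ pvW dt n := Nat.one_le_pow _ _ (by omega)
      have hf' : pvSW dt ((n, d) :: rest) = pvW dt n + pvSW dt rest := by simp [pvSW]
      obtain ⟨e, he⟩ : ∃ e, dt.2.length - n.toNat = e + 1 := ⟨dt.2.length - n.toNat - 1, by omega⟩
      rcases hpre.2.2 n.toNat hknat with hleaf | ⟨hlen2, hch⟩
      · -- leaf node
        have hle : pvSW dt rest ≤ f := by omega
        simp only [renderLoop, hrow]
        rw [if_pos hleaf]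
        rw [ih rest _ (fun p hp => hg p (List.mem_cons_of_mem _ hp)) hle]
        rw [List.flatMap_cons, he]
        simp only [emitAlt, hrow]
        rw [if_pos hleaf]
        split_ifs <;> simp
      · -- interior node
        have hne1 : ¬ dt.2[n.toNat]!.length = 1 := by omega
        have hch' := pv_get1 dt hpre.1 n h0 h1
        have hwt := pv_children_weight dt n h0 h1 hpre.1 hch (d + 1)
        have hsw : pvSW dt (dt.1[n.toNat]!.reverse.map (fun c => (c, d + 1)) ++ rest)
            = pvSW dt (dt.1[n.toNat]!.reverse.map (fun c => (c, d + 1))) + pvSW dt rest := by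
          simp [pvSW]
        have hle : pvSW dt (dt.1[n.toNat]!.reverse.map (fun c => (c, d + 1)) ++ rest) ≤ f := by
          omega
        have hg' : ∀ p ∈ dt.1[n.toNat]!.reverse.map (fun c => (c, d + 1)) ++ rest,
            0 ≤ p.1 ∧ p.1 < (dt.2.length : Int) := by
          intro p hp
          rcases List.mem_append.mp hp with hp | hp
          · simp only [List.mem_map, List.mem_reverse] at hp
            obtain ⟨c, hc, rfl⟩ := hp
            have := hch c hc
            exact ⟨by omega, this.2⟩
          · exact hg p (List.mem_cons_of_mem _ hp)
        have hfm : (dt.1[n.toNat]!.reverse.map (fun c => (c, d + 1))).flatMap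
              (fun p => emitAlt dt (dt.2.length - p.1.toNat) p.1 p.2)
            = dt.1[n.toNat]!.reverse.flatMap (fun c => emitAlt dt e c (d + 1)) := by
          rw [List.flatMap_map]
          apply pv_flatMap_congr
          intro c hc
          show emitAlt dt (dt.2.length - c.toNat) c (d + 1) = emitAlt dt e c (d + 1)
          have := hch c (List.mem_reverse.mp hc)
          exact emitAlt_stable dt hpre _ _ c (d + 1) (by omega) this.2 (by omega) (by omega)
        simp only [renderLoop, hrow, hch']
        rw [if_neg hne1, if_pos hlen2]
        rw [ih _ _ hg' hle]
        rw [List.flatMap_cons, List.flatMap_append, he]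
        simp only [emitAlt, hrow, hch', Option.getD_some]
        rw [if_neg hne1, if_pos hlen2]
        rw [hfm]
        split_ifs <;> simp

-- ===== VERDICT (by name: the statement is the Claim_ definition above) =====
theorem render_dt_spec : Claim_equal_render_dt := by
  intro dt _ hpre
  unfold Spec_render_dt render_dt render_dt_alt
  rcases hpre with ⟨hne, hleaf0⟩ | hpre
  · -- root is a leaf: A pops it, emits the return line, and the stack is empty
    have hLpos : 0 < dt.2.length := List.length_pos_iff.mpr hne
    have h2 := pv_get2 dt 0 le_rfl (by exact_mod_cast hLpos)
    have hmod : ¬ PySem.Int.mod 0 2 = 1 := by decide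
    obtain ⟨f', hfuel⟩ : ∃ f', ((dt.1.map List.length).sum + 1) ^ dt.2.length = f' + 1 :=
      ⟨((dt.1.map List.length).sum + 1) ^ dt.2.length - 1, by have := Nat.one_le_pow dt.2.length ((dt.1.map List.length).sum + 1) (by omega); omega⟩
    obtain ⟨e, he⟩ : ∃ e, dt.2.length = e + 1 := ⟨dt.2.length - 1, by omega⟩
    rw [hfuel, he]
    simp only [renderLoop, emitAlt, h2, Int.toNat_zero] at *
    rw [if_neg hmod, if_neg hmod, if_pos hleaf0, if_pos hleaf0, pv_renderLoop_nil]
    simp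
  · -- globally well-formed tree: the loop/recursion correspondence
    have hLpos : 0 < dt.2.length := List.length_pos_iff.mpr hpre.2.1
    rw [renderLoop_eq dt hpre _ [(0, 1)] pvHeader
        (by
          intro p hp
          simp only [List.mem_singleton] at hp
          subst hp
          exact ⟨le_refl 0, by show (0:Int) < (dt.2.length:Int); exact_mod_cast hLpos⟩)
        (by simp [pvSW, pvW])]
    simp
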